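-- pv_equiv track=rewrite | github.com/mskwyditd/ProcessSchedulingAlgorithms | rr.py | getCompletionTimesAndNrs
-- ===== SOURCE A (Python) =====
-- def getCompletionTimesAndNrs(processingList):
--     checkCompleted = []
--     completionTimesAndNrs = [[] for i in range(2)]
--
--     # getting completion times
--     for i in reversed(range( len(processingList) )):
--         tmp = processingList[i]
--         if tmp not in checkCompleted:
--             checkCompleted.append(tmp)
--             completionTimesAndNrs[0].insert(0, i + 1)
--             completionTimesAndNrs[1].insert(0, tmp)
--     return completionTimesAndNrs
-- ===== SOURCE B (Python) =====
-- def getCompletionTimesAndNrs(processingList):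
--     keep = [(i + 1, v) for i, v in enumerate(processingList)
--             if v not in processingList[i + 1:]]
--     return [[t for t, _ in keep], [v for _, v in keep]]
-- ===== Notes on version B (the rewrite author's own statement) =====
-- stated objective: simpler
-- what changed: Replaces the reversed scan with a seen-list, membership test and insert(0) by one forward comprehension keeping index i exactly when the value does not reappear in processingList[i+1:], then splitting the kept (time, value) pairs into the two result lists.
import Mathlib
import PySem

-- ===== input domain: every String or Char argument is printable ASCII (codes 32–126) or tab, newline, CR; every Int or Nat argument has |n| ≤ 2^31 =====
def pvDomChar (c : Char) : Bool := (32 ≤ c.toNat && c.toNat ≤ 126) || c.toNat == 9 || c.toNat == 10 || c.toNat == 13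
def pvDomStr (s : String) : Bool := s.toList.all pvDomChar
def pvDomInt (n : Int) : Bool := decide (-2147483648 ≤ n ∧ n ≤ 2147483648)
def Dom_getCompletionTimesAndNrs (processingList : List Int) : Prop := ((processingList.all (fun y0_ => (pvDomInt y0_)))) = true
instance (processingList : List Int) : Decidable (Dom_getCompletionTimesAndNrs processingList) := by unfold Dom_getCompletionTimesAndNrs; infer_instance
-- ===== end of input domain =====

-- B replaces A's reversed scan with seen-list and insert(0) by one forward
-- comprehension keeping index i iff the value does not reappear later (simpler).

-- ===== PORT A =====
-- literal port of A: reversed index loop, seen-list 'checkCompleted', insert(0) = cons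
def getCompletionTimesAndNrs (processingList : List Int) : List (List Int) :=
  let s :=
    ((PySem.List.pyRange 0 (processingList.length : Int) 1).reverse).foldl
      (fun (st : List Int × List Int × List Int) (i : Int) =>
        let tmp := (PySem.List.pyGet? processingList i).getD 0
        if tmp ∈ st.1 then st
        else (st.1 ++ [tmp], (i + 1) :: st.2.1, tmp :: st.2.2))
      ([], [], [])
  [s.2.1, s.2.2]

-- ===== PORT B =====
-- literal port of Source B: enumerate + suffix-slice membership filter, then split
def getCompletionTimesAndNrs_alt (processingList : List Int) : List (List Int) :=
  let keep := (PySem.List.enumerate processingList).filter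
    (fun p => !((PySem.List.slice processingList (some (p.1 + 1)) none).contains p.2))
  [keep.map (fun p => p.1 + 1), keep.map (fun p => p.2)]

-- ===== PRECONDITION & SPEC =====
def Spec_getCompletionTimesAndNrs (processingList : List Int) (out : List (List Int)) : Prop := out = getCompletionTimesAndNrs_alt processingList
instance (processingList : List Int) (out : List (List Int)) : Decidable (Spec_getCompletionTimesAndNrs processingList out) := by unfold Spec_getCompletionTimesAndNrs; infer_instance

-- ===== CLAIM (what is proved, stated in full; the proofs are below) =====
def Claim_equal_getCompletionTimesAndNrs : Prop := ∀ (processingList : List Int), Dom_getCompletionTimesAndNrs processingList → Spec_getCompletionTimesAndNrs processingList (getCompletionTimesAndNrs processingList)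

-- ===== LEMMAS AND PROOFS =====

-- keep index j iff L[j] does not reappear in L[j+1:]
def pvCond (L : List Int) (j : Nat) : Bool := !((L.drop (j + 1)).contains (L.getD j 0))

def pvKeep (L : List Int) (i : Nat) : List Nat := (List.range i).filter (pvCond L)

def pvStep (L : List Int) (st : List Int × List Int × List Int) (i : Int) :
    List Int × List Int × List Int :=
  let tmp := (PySem.List.pyGet? L i).getD 0
  if tmp ∈ st.1 then st
  else (st.1 ++ [tmp], (i + 1) :: st.2.1, tmp :: st.2.2)

lemma pvStep_nat (L : List Int) (st : List Int × List Int × List Int) (k : Nat)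
    (_ : k < L.length) :
    pvStep L st (k : Int) =
      if L.getD k 0 ∈ st.1 then st
      else (st.1 ++ [L.getD k 0], ((k : Int) + 1) :: st.2.1, L.getD k 0 :: st.2.2) := by
  simp [pvStep, PySem.List.pyGet?_natCast, List.getD]

lemma pvKeep_succ (L : List Int) (i : Nat) :
    pvKeep L (i + 1) = pvKeep L i ++ if pvCond L i then [i] else [] := by
  by_cases h : pvCond L i <;>
    simp [pvKeep, List.range_succ, List.filter_append, List.filter, h]

lemma pv_loop_inv (L : List Int) :
    ∀ (i : Nat), i ≤ L.length → ∀ (C T V : List Int), (∀ v, v ∈ C ↔ v ∈ L.drop i) →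
    ((List.range i).foldr (fun (k : Nat) st => pvStep L st (k : Int)) (C, T, V)).2
      = ((pvKeep L i).map (fun (j : Nat) => (j : Int) + 1) ++ T,
         (pvKeep L i).map (fun (j : Nat) => L.getD j 0) ++ V) := by
  intro i
  induction i with
  | zero => intro _ C T V _; simp [pvKeep]
  | succ i ih =>
    intro hi C T V hC
    have hilt : i < L.length := hi
    have hdrop : L.drop i = L[i] :: L.drop (i + 1) := List.drop_eq_getElem_cons hilt
    have hget : L.getD i 0 = L[i] := by
      simp [List.getD, List.getElem?_eq_getElem hilt]
    rw [List.range_succ, List.foldr_append]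
    simp only [List.foldr_cons, List.foldr_nil]
    rw [pvStep_nat L _ i hilt]
    by_cases hmem : L.getD i 0 ∈ C
    · have htail : L[i] ∈ L.drop (i + 1) := by
        rw [← hget]; exact (hC _).1 hmem
      have hcond : pvCond L i = false := by
        simp only [pvCond, hget, List.contains_eq_mem, decide_eq_true_eq,
          Bool.not_eq_false'] at *
        simpa using htail
      rw [if_pos hmem]
      rw [ih (le_of_lt hilt) C T V ?_]
      · simp [pvKeep_succ, hcond]
      · intro v
        rw [hC v, hdrop]
        simp only [List.mem_cons]
        constructor
        · exact Or.inr
        · rintro (rfl | h)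
          · exact htail
          · exact h
    · have htail : L[i] ∉ L.drop (i + 1) := by
        rw [← hget]; intro h; exact hmem ((hC _).2 h)
      have hcond : pvCond L i = true := by
        simp only [pvCond, hget, Bool.not_eq_true', List.contains_eq_mem,
          decide_eq_false_iff_not]
        simpa using htail
      rw [if_neg hmem]
      rw [ih (le_of_lt hilt) (C ++ [L.getD i 0]) _ _ ?_]
      · simp [pvKeep_succ, hcond]
      · intro v
        rw [hdrop]
        simp only [List.mem_append, List.mem_cons, hC v, hget]
        tauto

lemma pvA_char (L : List Int) :
    getCompletionTimesAndNrs L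
      = [(pvKeep L L.length).map (fun (j : Nat) => (j : Int) + 1),
         (pvKeep L L.length).map (fun (j : Nat) => L.getD j 0)] := by
  unfold getCompletionTimesAndNrs
  rw [PySem.List.pyRange_one, List.foldl_reverse, List.foldr_map]
  simp only [Int.sub_zero, Int.toNat_natCast, zero_add]
  show [(List.foldr (fun (k : Nat) st => pvStep L st (k : Int)) ([], [], [])
          (List.range L.length)).2.1,
        (List.foldr (fun (k : Nat) st => pvStep L st (k : Int)) ([], [], [])
          (List.range L.length)).2.2] = _
  have harg := pv_loop_inv L L.length le_rfl [] [] [] (by simp)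
  rw [show (List.foldr (fun (k : Nat) st => pvStep L st (k : Int)) ([], [], [])
        (List.range L.length)).2.1
      = ((List.foldr (fun (k : Nat) st => pvStep L st (k : Int)) ([], [], [])
        (List.range L.length)).2).1 from rfl,
    show (List.foldr (fun (k : Nat) st => pvStep L st (k : Int)) ([], [], [])
        (List.range L.length)).2.2
      = ((List.foldr (fun (k : Nat) st => pvStep L st (k : Int)) ([], [], [])
        (List.range L.length)).2).2 from rfl, harg]
  simp

lemma pvB_char (L : List Int) :
    getCompletionTimesAndNrs_alt L
      = [(pvKeep L L.length).map (fun (j : Nat) => (j : Int) + 1),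
         (pvKeep L L.length).map (fun (j : Nat) => L.getD j 0)] := by
  unfold getCompletionTimesAndNrs_alt
  rw [PySem.List.enumerate_eq_map_pyRange L 0, PySem.List.pyRange_one]
  simp only [Int.sub_zero, zero_add, List.map_map]
  have hfm : ∀ (l : List Nat),
      (l.map ((fun (j : Int) => (j, PySem.List.pyGetD L j 0)) ∘ (fun (k : Nat) => (k : Int)))).filter
        (fun p => !((PySem.List.slice L (some (p.1 + 1)) none).contains p.2))
      = (l.filter (pvCond L)).map (fun (k : Nat) => ((k : Int), L.getD k 0)) := by
    intro l
    induction l with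
    | nil => rfl
    | cons k l ihl =>
      simp only [List.map_cons, List.filter_cons, ihl, Function.comp]
      have hsl : PySem.List.slice L (some ((k : Int) + 1)) none = L.drop (k + 1) := by
        rw [show ((k : Int) + 1) = ((k + 1 : Nat) : Int) by push_cast; ring]
        exact PySem.List.slice_from_natCast L (k + 1)
      simp only [hsl, PySem.List.pyGetD_natCast]
      by_cases hc : pvCond L k
      · have hb : (L.drop (k + 1)).contains (L.getD k 0) = false := by
          simpa [pvCond] using hc
        simp only [hb, hc, Bool.not_false, if_true, List.map_cons]
      · have hb : (L.drop (k + 1)).contains (L.getD k 0) = true := by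
          simpa [pvCond] using hc
        simp only [hb, hc, Bool.not_true, Bool.false_eq_true, if_false]
  have hlen : (PySem.List.len L).toNat = L.length := by
    simp [PySem.List.len]
  rw [hlen, hfm (List.range L.length)]
  simp [pvKeep, List.map_map, Function.comp]

-- ===== VERDICT (by name: the statement is the Claim_ definition above) =====
theorem getCompletionTimesAndNrs_spec : Claim_equal_getCompletionTimesAndNrs := by
  intro L _
  unfold Spec_getCompletionTimesAndNrs
  rw [pvA_char, pvB_char]
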